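-- pv_equiv track=rewrite | github.com/cloudhubs/simple-log-clustering | src/preprocessor.py | form_groups
-- ===== SOURCE A (Python) =====
-- def tokenize(log, separator):
--     return log.split(separator)
--
-- def form_groups(logs, separator):
--     log_groups = {}
--     for log in logs:
--         token_length = len(tokenize(log, separator))
--         if token_length not in log_groups:
--             log_groups[token_length] = []
--         log_groups[token_length].append(tokenize(log, separator))
--
--     return log_groups
-- ===== SOURCE B (Python) =====
-- def tokenize(log, separator):
--     return log.split(separator)
--
-- def form_groups(logs, separator):
--     tokens = [tokenize(log, separator) for log in logs]
--     keys = list(dict.fromkeys(len(t) for t in tokens))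
--     return {k: [t for t in tokens if len(t) == k] for k in keys}
-- ===== Notes on version B (the rewrite author's own statement) =====
-- stated objective: alternative
-- what changed: Replaces the single-pass dict bucket-append (tokenizing each log twice) with a two-phase plan: tokenize every log once, dedup the token counts in first-occurrence order, then build each group by a filter over the token lists. Pre_ excludes the empty separator, on which str.split raises ValueError (except vacuously when logs is empty).
-- outside the precondition, e.g. on form_groups([], ''): A returns {}, B returns {}
import Mathlib
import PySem

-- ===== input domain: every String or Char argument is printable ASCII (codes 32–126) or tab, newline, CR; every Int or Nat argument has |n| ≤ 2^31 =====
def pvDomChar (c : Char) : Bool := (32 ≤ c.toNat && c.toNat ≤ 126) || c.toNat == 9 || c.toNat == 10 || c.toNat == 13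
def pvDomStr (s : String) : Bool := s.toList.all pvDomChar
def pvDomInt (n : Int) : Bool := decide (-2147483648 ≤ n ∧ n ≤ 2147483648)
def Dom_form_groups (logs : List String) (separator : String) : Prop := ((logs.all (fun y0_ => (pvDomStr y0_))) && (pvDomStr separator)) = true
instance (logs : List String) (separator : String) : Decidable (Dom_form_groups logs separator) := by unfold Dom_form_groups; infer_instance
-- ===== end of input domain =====

-- B tokenizes each log once, collects the distinct token counts in first-occurrence
-- order, and builds each group by a filter pass; A appends into a dict in one pass.

-- ===== PORT A =====
-- log.split(separator); Python raises ValueError when separator = "" (excluded by Pre_),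
-- split? returns none exactly there and we take [] for totality.
def tokenize (log : String) (separator : String) : List String :=
  (PySem.Str.split? log separator).getD []

def form_groups (logs : List String) (separator : String) : List (Int × List (List String)) :=
  (logs.foldl (fun log_groups log =>
      let token_length : Int := (tokenize log separator).length
      let log_groups := if log_groups.contains token_length then log_groups
                        else log_groups.insert token_length []
      log_groups.modify token_length [] (fun v => v ++ [tokenize log separator]))
    PySem.Dict.empty).items

-- ===== PORT B =====
def form_groups_alt (logs : List String) (separator : String) : List (Int × List (List String)) :=
  let tokens := logs.map (fun log => tokenize log separator)
  let keys := PySem.List.dedup (tokens.map (fun t => (t.length : Int)))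
  -- dict comprehension over the deduped keys: items in key-list order
  keys.map (fun k => (k, tokens.filter (fun t => (t.length : Int) == k)))

-- ===== PRECONDITION & SPEC =====
-- Python's str.split raises ValueError on an empty separator; excluded (vacuously both
-- return {} when logs is also empty, still excluded for uniformity).
def Pre_form_groups (logs : List String) (separator : String) : Prop := separator ≠ ""
instance (logs : List String) (separator : String) : Decidable (Pre_form_groups logs separator) := by unfold Pre_form_groups; infer_instance
def pvWitness_form_groups : List String × String := (["a b", "c", "d e"], " ")

def Spec_form_groups (logs : List String) (separator : String) (out : List (Int × List (List String))) : Prop := out = form_groups_alt logs separator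
instance (logs : List String) (separator : String) (out : List (Int × List (List String))) : Decidable (Spec_form_groups logs separator out) := by unfold Spec_form_groups; infer_instance

-- ===== CLAIM (what is proved, stated in full; the proofs are below) =====
def Claim_equal_form_groups : Prop := ∀ (logs : List String) (separator : String), Dom_form_groups logs separator → Pre_form_groups logs separator → Spec_form_groups logs separator (form_groups logs separator)


-- ===== LEMMAS AND PROOFS =====
-- A's "if key missing then insert []" followed by append-modify is one modify.
theorem step_eq (d : PySem.Dict Int (List (List String))) (k : Int) (f : List (List String) → List (List String)) :
    (if d.contains k then d else d.insert k []).modify k [] f = d.modify k [] f := by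
  split_ifs with h
  · rfl
  · rw [PySem.Dict.modify, PySem.Dict.modify, PySem.Dict.getD_insert_self,
        PySem.Dict.insert_insert_self, PySem.Dict.getD_of_not_contains (h := by simpa using h)]

theorem filter_pair {α : Type} (xs : List α) (f : α → Int) (c : Int) :
    ((xs.map (fun t => (f t, t))).filter (fun p => p.1 == c)).map (fun p => p.2)
      = xs.filter (fun t => f t == c) := by
  simp [List.filter_map, Function.comp_def, List.map_map]

theorem main_eq (logs : List String) (separator : String) :
    form_groups logs separator = form_groups_alt logs separator := by
  unfold form_groups form_groups_alt
  have hfun : (fun (log_groups : PySem.Dict Int (List (List String))) (log : String) =>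
      let token_length : Int := (tokenize log separator).length
      let log_groups := if log_groups.contains token_length then log_groups
                        else log_groups.insert token_length []
      log_groups.modify token_length [] (fun v => v ++ [tokenize log separator]))
      = (fun d log => d.modify ((tokenize log separator).length : Int) [] (fun v => v ++ [tokenize log separator])) := by
    funext d log
    exact step_eq d _ _
  rw [hfun]
  -- recast the fold over logs as a fold over (key, token-list) pairs
  have hl : (logs.foldl (fun d log => d.modify ((tokenize log separator).length : Int) [] (fun v => v ++ [tokenize log separator])) PySem.Dict.empty)
      = ((logs.map (fun log => (((tokenize log separator).length : Int), tokenize log separator))).foldl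
          (fun d p => d.modify p.1 [] (fun v => v ++ [p.2])) PySem.Dict.empty) := by
    rw [List.foldl_map]
  rw [hl]
  set l := logs.map (fun log => (((tokenize log separator).length : Int), tokenize log separator)) with hldef
  have hnd : ((l.foldl (fun d p => d.modify p.1 [] (fun v => v ++ [p.2])) PySem.Dict.empty)).keys.Nodup := by
    have := PySem.Dict.nodup_keys_foldl_modify_key l (fun p => p.1) [] (fun _ p v => v ++ [p.2]) PySem.Dict.empty PySem.Dict.nodup_keys_empty
    simpa using this
  rw [PySem.Dict.items_eq_map_keys _ hnd []]
  have hkeys : ((l.foldl (fun d p => d.modify p.1 [] (fun v => v ++ [p.2])) PySem.Dict.empty)).keys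
      = PySem.List.dedup ((logs.map (fun log => tokenize log separator)).map (fun t => (t.length : Int))) := by
    have := PySem.Dict.keys_foldl_modify_key l (fun p => p.1) [] (fun _ p v => v ++ [p.2]) PySem.Dict.empty
    simp only [this]
    rw [PySem.List.dedup_eq_ofList]
    have : l.map (fun p => p.1) = (logs.map (fun log => tokenize log separator)).map (fun t => (t.length : Int)) := by
      simp [hldef, List.map_map, Function.comp_def]
    rw [this]
    rfl
  rw [hkeys]
  apply List.map_congr_left
  intro k hk
  congr 1
  rw [PySem.Dict.getD_foldl_modify_append]
  have : l = (logs.map (fun log => tokenize log separator)).map (fun t => ((t.length : Int), t)) := by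
    simp [hldef, List.map_map, Function.comp_def]
  rw [this, filter_pair]
  simp [PySem.Dict.getD_empty]

-- ===== VERDICT (by name: the statement is the Claim_ definition above) =====
theorem form_groups_spec : Claim_equal_form_groups := by
  intro logs separator _ _
  unfold Spec_form_groups
  exact main_eq logs separator
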